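-- pv_equiv track=rewrite | github.com/sekihan02/zip-edu | src/zip_edu/lz77.py | length_to_symbol
-- ===== SOURCE A (Python) =====
-- LENGTH_BASE = [
--     3,
--     4,
--     5,
--     6,
--     7,
--     8,
--     9,
--     10,
--     11,
--     13,
--     15,
--     17,
--     19,
--     23,
--     27,
--     31,
--     35,
--     43,
--     51,
--     59,
--     67,
--     83,
--     99,
--     115,
--     131,
--     163,
--     195,
--     227,
--     258,
-- ]
--
-- LENGTH_EXTRA = [
--     0,
--     0,
--     0,
--     0,
--     0,
--     0,
--     0,
--     0,
--     1,
--     1,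
--     1,
--     1,
--     2,
--     2,
--     2,
--     2,
--     3,
--     3,
--     3,
--     3,
--     4,
--     4,
--     4,
--     4,
--     5,
--     5,
--     5,
--     5,
--     0,
-- ]
--
-- def length_to_symbol(length: int) -> tuple[int, int, int]:
--     if not (3 <= length <= 258):
--         raise ValueError("invalid match length")
--     if length == 258:
--         return 285, 0, 0
--     for i in range(28):
--         base = LENGTH_BASE[i]
--         extra_bits = LENGTH_EXTRA[i]
--         max_value = base + (1 << extra_bits) - 1
--         if base <= length <= max_value:
--             return 257 + i, length - base, extra_bits
--     raise ValueError("length symbol conversion failed")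
-- ===== SOURCE B (Python) =====
-- import bisect
--
-- LENGTH_BASE = [
--     3, 4, 5, 6, 7, 8, 9, 10, 11, 13, 15, 17, 19, 23, 27, 31, 35, 43,
--     51, 59, 67, 83, 99, 115, 131, 163, 195, 227, 258,
-- ]
--
-- LENGTH_EXTRA = [
--     0, 0, 0, 0, 0, 0, 0, 0, 1, 1, 1, 1, 2, 2, 2, 2, 3, 3,
--     3, 3, 4, 4, 4, 4, 5, 5, 5, 5, 0,
-- ]
--
-- def length_to_symbol(length: int) -> tuple[int, int, int]:
--     if not (3 <= length <= 258):
--         raise ValueError("invalid match length")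
--     i = bisect.bisect_right(LENGTH_BASE, length) - 1
--     return 257 + i, length - LENGTH_BASE[i], LENGTH_EXTRA[i]
-- ===== Notes on version B (the rewrite author's own statement) =====
-- stated objective: idiomatic
-- what changed: Replaced the 28-step linear scan (with a special case for 258) by a binary search (bisect_right) over the full 29-entry base table, which covers 258 automatically.
import Mathlib
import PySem

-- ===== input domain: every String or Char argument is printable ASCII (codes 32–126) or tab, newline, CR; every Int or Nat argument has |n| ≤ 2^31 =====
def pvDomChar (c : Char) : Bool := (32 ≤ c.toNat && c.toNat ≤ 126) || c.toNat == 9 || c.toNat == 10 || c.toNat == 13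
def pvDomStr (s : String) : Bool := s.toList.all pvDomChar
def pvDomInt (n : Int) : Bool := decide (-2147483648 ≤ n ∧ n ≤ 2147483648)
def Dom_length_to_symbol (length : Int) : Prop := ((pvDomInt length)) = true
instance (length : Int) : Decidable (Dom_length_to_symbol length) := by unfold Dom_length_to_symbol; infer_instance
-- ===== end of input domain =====

-- B replaces A's 28-step linear scan (plus an explicit 258 special case) by a
-- bisect_right binary search over the full 29-entry base table (idiomatic).

-- ===== PORT A =====
def pvLENGTH_BASE : List Int :=
  [3, 4, 5, 6, 7, 8, 9, 10, 11, 13, 15, 17, 19, 23, 27, 31, 35, 43,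
   51, 59, 67, 83, 99, 115, 131, 163, 195, 227, 258]

def pvLENGTH_EXTRA : List Int :=
  [0, 0, 0, 0, 0, 0, 0, 0, 1, 1, 1, 1, 2, 2, 2, 2, 3, 3,
   3, 3, 4, 4, 4, 4, 5, 5, 5, 5, 0]

-- the 'for i in range(28)' loop with early return; none = fell through (ValueError)
def pvALoop (length : Int) : Nat → Option (Int × Int × Int)
  | 0 => none
  | n + 1 =>
    let i := 28 - (n + 1)
    let base := pvLENGTH_BASE.getD i 0
    let extra_bits := pvLENGTH_EXTRA.getD i 0
    let max_value := base + (1 <<< extra_bits.toNat) - 1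
    if base ≤ length ∧ length ≤ max_value then
      some (257 + (i : Int), length - base, extra_bits)
    else
      pvALoop length n

-- (0,0,0) stands for the ValueError paths, which Pre_ excludes
def length_to_symbol (length : Int) : Int × Int × Int :=
  if ¬(3 ≤ length ∧ length ≤ 258) then (0, 0, 0)
  else if length = 258 then (285, 0, 0)
  else
    match pvALoop length 28 with
    | some r => r
    | none => (0, 0, 0)

-- ===== PORT B =====
-- bisect.bisect_right, transliterated: lo/hi halving loop
-- fuel = hi - lo bounds the iteration count; each step shrinks the interval
def pvBisectGo (a : List Int) (x : Int) : Nat → Nat → Nat → Nat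
  | 0, lo, _ => lo
  | fuel + 1, lo, hi =>
    if lo < hi then
      let mid := (lo + hi) / 2
      if x < a.getD mid 0 then pvBisectGo a x fuel lo mid
      else pvBisectGo a x fuel (mid + 1) hi
    else lo

def pvBisectRight (a : List Int) (x : Int) (lo hi : Nat) : Nat :=
  pvBisectGo a x (hi - lo) lo hi

def length_to_symbol_alt (length : Int) : Int × Int × Int :=
  if ¬(3 ≤ length ∧ length ≤ 258) then (0, 0, 0)
  else
    let i := pvBisectRight pvLENGTH_BASE length 0 pvLENGTH_BASE.length - 1
    (257 + (i : Int), length - pvLENGTH_BASE.getD i 0, pvLENGTH_EXTRA.getD i 0)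

-- ===== PRECONDITION & SPEC =====
-- Pre_ excludes exactly the lengths outside [3, 258], on which A raises ValueError
def Pre_length_to_symbol (length : Int) : Prop := 3 ≤ length ∧ length ≤ 258
instance (length : Int) : Decidable (Pre_length_to_symbol length) := by unfold Pre_length_to_symbol; infer_instance
def pvWitness_length_to_symbol : Int := 17

def Spec_length_to_symbol (length : Int) (out : Int × Int × Int) : Prop := out = length_to_symbol_alt length
instance (length : Int) (out : Int × Int × Int) : Decidable (Spec_length_to_symbol length out) := by unfold Spec_length_to_symbol; infer_instance

-- ===== CLAIM (what is proved, stated in full; the proofs are below) =====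
def Claim_equal_length_to_symbol : Prop := ∀ (length : Int), Dom_length_to_symbol length → Pre_length_to_symbol length → Spec_length_to_symbol length (length_to_symbol length)

-- ===== LEMMAS AND PROOFS =====
-- A = B on every admitted length, checked exhaustively over the 256 cases
set_option maxRecDepth 4000 in
theorem pv_all_cases : ∀ n : Nat, n < 256 →
    length_to_symbol (3 + (n : Int)) = length_to_symbol_alt (3 + (n : Int)) := by
  decide

-- ===== VERDICT (by name: the statement is the Claim_ definition above) =====
theorem length_to_symbol_spec : Claim_equal_length_to_symbol := by
  intro length _ hpre
  unfold Spec_length_to_symbol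
  obtain ⟨h3, h258⟩ := hpre
  have hn : length = 3 + ((length - 3).toNat : Int) := by omega
  have hlt : (length - 3).toNat < 256 := by omega
  rw [hn]
  exact pv_all_cases _ hlt
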